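-- pv_equiv track=rewrite | github.com/yeonssu/Algorithm | 프로그래머스/체육복.py | solution
-- ===== SOURCE A (Python) =====
-- def solution(n, lost, reserve):
--     lost.sort()
--     reserve.sort()
--     answer = n - len(lost)
--     for r in reserve:
--         for l in lost:
--             if r - 1 == l:
--                 answer += 1
--                 break
--             elif r + 1 == l:
--                 answer += 1
--                 break
--     return answer
-- ===== SOURCE B (Python) =====
-- def solution(n, lost, reserve):
--     lost.sort()
--     reserve.sort()
--     res_count = {}
--     for r in reserve:
--         res_count[r] = res_count.get(r, 0) + 1
--     lost_set = set(lost)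
--     covered = 0
--     for l in lost_set:
--         covered += res_count.get(l - 1, 0) + res_count.get(l + 1, 0)
--     for v in res_count:
--         if v - 1 in lost_set and v + 1 in lost_set:
--             covered -= res_count[v]
--     return n - len(lost) + covered
-- ===== Notes on version B (the rewrite author's own statement) =====
-- stated objective: faster
-- what changed: Inverts the iteration: instead of scanning lost for every reserve element, B builds a multiplicity counter of reserve and a set of lost, sums the counter at l-1 and l+1 for each distinct lost value, and subtracts by inclusion-exclusion the counts of reserve values flanked by lost on both sides.
import Mathlib
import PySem

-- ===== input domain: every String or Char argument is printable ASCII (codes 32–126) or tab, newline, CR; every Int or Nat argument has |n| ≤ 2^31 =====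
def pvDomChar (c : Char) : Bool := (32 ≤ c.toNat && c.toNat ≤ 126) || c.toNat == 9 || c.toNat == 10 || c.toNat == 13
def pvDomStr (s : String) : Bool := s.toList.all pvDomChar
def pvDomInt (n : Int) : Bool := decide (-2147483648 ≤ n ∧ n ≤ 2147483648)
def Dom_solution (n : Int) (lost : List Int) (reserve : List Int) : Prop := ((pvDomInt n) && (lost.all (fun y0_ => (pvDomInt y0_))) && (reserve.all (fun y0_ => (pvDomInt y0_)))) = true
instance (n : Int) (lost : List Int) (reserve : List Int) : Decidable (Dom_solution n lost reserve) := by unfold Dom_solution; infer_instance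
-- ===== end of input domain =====

-- B inverts the iteration: a counter of reserve plus a set of lost, summing counts at l±1 per
-- distinct lost value and correcting doubly-flanked reserve values by inclusion-exclusion.
-- Both programs sort lost and reserve in place; the equivalence proved here is about the return value.

-- ===== PORT A =====
-- inner 'for l in lost' loop: adds 1 and breaks at the first l equal to r-1 or r+1
def solInnerA (r : Int) : List Int → Int
  | [] => 0
  | l :: t => if r - 1 = l then 1 else if r + 1 = l then 1 else solInnerA r t

def solution (n : Int) (lost : List Int) (reserve : List Int) : Int :=
  let lostS := PySem.List.sorted lost (fun x => x) false
  let reserveS := PySem.List.sorted reserve (fun x => x) false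
  reserveS.foldl (fun answer r => answer + solInnerA r lostS) (n - lostS.length)

-- ===== PORT B =====
def solution_alt (n : Int) (lost : List Int) (reserve : List Int) : Int :=
  let lostS := PySem.List.sorted lost (fun x => x) false
  let reserveS := PySem.List.sorted reserve (fun x => x) false
  let resCount : PySem.Dict Int Int :=
    reserveS.foldl (fun d r => d.insert r (d.getD r 0 + 1)) PySem.Dict.empty
  let lostSet : PySem.Set Int := PySem.Set.ofList lostS
  let covered :=
    lostSet.foldl (fun c l => c + (resCount.getD (l - 1) 0 + resCount.getD (l + 1) 0)) 0
  let covered2 :=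
    resCount.keys.foldl
      (fun c v =>
        if PySem.Set.contains lostSet (v - 1) && PySem.Set.contains lostSet (v + 1) then
          c - resCount.getD v 0
        else c)
      covered
  n - lostS.length + covered2

-- ===== PRECONDITION & SPEC =====
def Spec_solution (n : Int) (lost : List Int) (reserve : List Int) (out : Int) : Prop := out = solution_alt n lost reserve
instance (n : Int) (lost : List Int) (reserve : List Int) (out : Int) : Decidable (Spec_solution n lost reserve out) := by unfold Spec_solution; infer_instance

-- ===== CLAIM =====
def Claim_equal_solution : Prop := ∀ (n : Int) (lost : List Int) (reserve : List Int), Dom_solution n lost reserve → Spec_solution n lost reserve (solution n lost reserve)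

-- ===== LEMMAS AND PROOFS =====

theorem solInnerA_eq (r : Int) (L : List Int) :
    solInnerA r L = if (r - 1 ∈ L ∨ r + 1 ∈ L) then 1 else 0 := by
  induction L with
  | nil => simp [solInnerA]
  | cons l t ih =>
    simp only [solInnerA, ih, List.mem_cons]
    by_cases h1 : r - 1 = l
    · simp [h1.symm]
    · by_cases h2 : r + 1 = l
      · simp [h2.symm]
      · have e1 : ¬ (l = r - 1) := fun h => h1 h.symm
        have e2 : ¬ (l = r + 1) := fun h => h2 h.symm
        simp [h1, h2]

-- sum of an Int-valued map distributes over pointwise addition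
theorem sum_map_add (l : List Int) (f g : Int → Int) :
    (l.map (fun x => f x + g x)).sum = (l.map f).sum + (l.map g).sum := by
  induction l with
  | nil => simp
  | cons a t ih => simp [ih]; ring

theorem sum_map_neg_int (l : List Int) (f : Int → Int) :
    (l.map (fun x => -(f x))).sum = -((l.map f).sum) := by
  induction l with
  | nil => simp
  | cons a t ih => simp [ih]; ring

-- double-sum swap
theorem sum_map_swap (D R : List Int) (φ : Int → Int → Int) :
    (D.map (fun v => (R.map (φ v)).sum)).sum = (R.map (fun r => (D.map (fun v => φ v r)).sum)).sum := by
  induction D with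
  | nil => simp
  | cons a t ih =>
    simp only [List.map_cons, List.sum_cons, ih, ← sum_map_add]

-- count as an Int sum of indicators
theorem count_eq_sum (R : List Int) (v : Int) :
    ((R.count v : Nat) : Int) = (R.map (fun r => if r = v then (1:Int) else 0)).sum := by
  induction R with
  | nil => simp
  | cons a t ih =>
    by_cases h : a = v
    · simp [h, ← ih]; ring
    · simp [h, ← ih]

-- indicator sum over a nodup list = membership indicator
theorem sum_indicator_nodup (D : List Int) (hD : D.Nodup) (p : Int → Prop) [DecidablePred p]
    (x : Int) (hp : ∀ l, p l ↔ l = x) :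
    (D.map (fun l => if p l then (1:Int) else 0)).sum = if x ∈ D then 1 else 0 := by
  induction D with
  | nil => simp
  | cons a t ih =>
    rcases List.nodup_cons.mp hD with ⟨ha, ht⟩
    by_cases h : p a
    · have hax : a = x := (hp a).mp h
      subst hax
      have : (t.map (fun l => if p l then (1:Int) else 0)).sum = 0 := by
        rw [ih ht, if_neg ha]
      simp [h, this]
    · have hax : x ≠ a := fun he => h ((hp a).mpr he.symm)
      simp [h, ih ht, hax]


-- foldl accumulating additions = init + sum
theorem foldl_add_int (l : List Int) (g : Int → Int) (a : Int) :
    l.foldl (fun acc x => acc + g x) a = a + (l.map g).sum :=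
  PySem.List.foldl_add l g a

-- ===== VERDICT =====
theorem solution_spec : Claim_equal_solution := by
  intro n lost reserve _
  unfold Spec_solution solution solution_alt
  simp only []
  set Ls := PySem.List.sorted lost (fun x => x) false with hLs
  set Rs := PySem.List.sorted reserve (fun x => x) false with hRs
  rw [PySem.Dict.foldl_insert_getD_add_one_eq_counter]
  set DL := PySem.Set.ofList Ls with hDL
  have hDLnd : DL.Nodup := PySem.Set.nodup_ofList Ls
  have hDLmem : ∀ x, x ∈ DL ↔ x ∈ Ls := fun x => PySem.Set.mem_ofList Ls x
  rw [PySem.Dict.keys_counter]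
  set DR := PySem.Set.ofList Rs with hDR
  have hDRnd : DR.Nodup := PySem.Set.nodup_ofList Rs
  have hDRmem : ∀ x, x ∈ DR ↔ x ∈ Rs := fun x => PySem.Set.mem_ofList Rs x
  simp only [PySem.Dict.getD_counter]
  -- rewrite all three loops as sums
  rw [foldl_add_int]
  have hsub : (fun (c v : Int) =>
      if PySem.Set.contains DL (v - 1) && PySem.Set.contains DL (v + 1) then
        c - ((Rs.count v : Nat) : Int) else c) =
      fun c v => c + (if PySem.Set.contains DL (v - 1) && PySem.Set.contains DL (v + 1) then
        -((Rs.count v : Nat) : Int) else 0) := by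
    funext c v; split <;> ring
  rw [hsub, foldl_add_int, foldl_add_int]
  -- now everything is 'n - len + (0 + S1) + S2' vs A's 'n - len + SA'; reduce to sums
  have key : (Rs.map (fun r => solInnerA r Ls)).sum =
      (DL.map (fun l => ((Rs.count (l - 1) : Nat) : Int) + ((Rs.count (l + 1) : Nat) : Int))).sum +
      (DR.map (fun v => if PySem.Set.contains DL (v - 1) && PySem.Set.contains DL (v + 1) then
        -((Rs.count v : Nat) : Int) else 0)).sum := by
    have h1 : (DL.map (fun l => ((Rs.count (l - 1) : Nat) : Int))).sum =
        (Rs.map (fun r => if r + 1 ∈ DL then (1:Int) else 0)).sum := by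
      calc (DL.map (fun l => ((Rs.count (l - 1) : Nat) : Int))).sum
          = (DL.map (fun l => (Rs.map (fun r => if r = l - 1 then (1:Int) else 0)).sum)).sum := by
            simp only [count_eq_sum]
        _ = (Rs.map (fun r => (DL.map (fun l => if r = l - 1 then (1:Int) else 0)).sum)).sum :=
            sum_map_swap DL Rs _
        _ = (Rs.map (fun r => if r + 1 ∈ DL then (1:Int) else 0)).sum := by
            refine congrArg _ (List.map_congr_left fun r _ => ?_)
            exact sum_indicator_nodup DL hDLnd (fun l => r = l - 1) (r + 1) (fun l => by omega)
    have h2 : (DL.map (fun l => ((Rs.count (l + 1) : Nat) : Int))).sum =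
        (Rs.map (fun r => if r - 1 ∈ DL then (1:Int) else 0)).sum := by
      calc (DL.map (fun l => ((Rs.count (l + 1) : Nat) : Int))).sum
          = (DL.map (fun l => (Rs.map (fun r => if r = l + 1 then (1:Int) else 0)).sum)).sum := by
            simp only [count_eq_sum]
        _ = (Rs.map (fun r => (DL.map (fun l => if r = l + 1 then (1:Int) else 0)).sum)).sum :=
            sum_map_swap DL Rs _
        _ = (Rs.map (fun r => if r - 1 ∈ DL then (1:Int) else 0)).sum := by
            refine congrArg _ (List.map_congr_left fun r _ => ?_)
            exact sum_indicator_nodup DL hDLnd (fun l => r = l + 1) (r - 1) (fun l => by omega)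
    have h3 : (DR.map (fun v => if PySem.Set.contains DL (v - 1) && PySem.Set.contains DL (v + 1) then
        -((Rs.count v : Nat) : Int) else 0)).sum =
        (Rs.map (fun r => if PySem.Set.contains DL (r - 1) && PySem.Set.contains DL (r + 1) then
          (-1:Int) else 0)).sum := by
      calc (DR.map (fun v => if PySem.Set.contains DL (v - 1) && PySem.Set.contains DL (v + 1) then
            -((Rs.count v : Nat) : Int) else 0)).sum
          = (DR.map (fun v => (Rs.map (fun r =>
              if r = v ∧ (PySem.Set.contains DL (r - 1) && PySem.Set.contains DL (r + 1)) = true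
              then (-1:Int) else 0)).sum)).sum := by
            refine congrArg _ (List.map_congr_left fun v _ => ?_)
            by_cases hb : (PySem.Set.contains DL (v - 1) && PySem.Set.contains DL (v + 1)) = true
            · rw [if_pos hb]
              have : (Rs.map (fun r =>
                  if r = v ∧ (PySem.Set.contains DL (r - 1) && PySem.Set.contains DL (r + 1)) = true
                  then (-1:Int) else 0)) = Rs.map (fun r => -(if r = v then (1:Int) else 0)) := by
                refine List.map_congr_left fun r _ => ?_
                by_cases hr : r = v
                · subst hr
                  rcases (Bool.and_eq_true _ _).mp hb with ⟨hb1, hb2⟩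
                  rw [PySem.Set.contains_iff] at hb1 hb2
                  simp [hb1, hb2]
                · simp [hr]
              rw [this, sum_map_neg_int, count_eq_sum]
            · rw [if_neg hb]
              have : (Rs.map (fun r =>
                  if r = v ∧ (PySem.Set.contains DL (r - 1) && PySem.Set.contains DL (r + 1)) = true
                  then (-1:Int) else 0)) = Rs.map (fun _ => (0:Int)) := by
                refine List.map_congr_left fun r _ => ?_
                rw [if_neg]; rintro ⟨rfl, hc⟩; exact hb hc
              rw [this]; simp
        _ = (Rs.map (fun r => (DR.map (fun v =>
              if r = v ∧ (PySem.Set.contains DL (r - 1) && PySem.Set.contains DL (r + 1)) = true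
              then (-1:Int) else 0)).sum)).sum := sum_map_swap DR Rs _
        _ = (Rs.map (fun r => if PySem.Set.contains DL (r - 1) && PySem.Set.contains DL (r + 1) then
              (-1:Int) else 0)).sum := by
            refine congrArg _ (List.map_congr_left fun r hr => ?_)
            by_cases hb : (PySem.Set.contains DL (r - 1) && PySem.Set.contains DL (r + 1)) = true
            · have : (DR.map (fun v =>
                  if r = v ∧ (PySem.Set.contains DL (r - 1) && PySem.Set.contains DL (r + 1)) = true
                  then (-1:Int) else 0)) = DR.map (fun v => -(if v = r then (1:Int) else 0)) := by
                refine List.map_congr_left fun v _ => ?_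
                by_cases hv : v = r
                · subst hv
                  rcases (Bool.and_eq_true _ _).mp hb with ⟨hb1, hb2⟩
                  rw [PySem.Set.contains_iff] at hb1 hb2
                  simp [hb1, hb2]
                · have : ¬ (r = v) := fun h => hv h.symm
                  simp [this, hv]
              rw [this, sum_map_neg_int,
                sum_indicator_nodup DR hDRnd (fun v => v = r) r (fun _ => Iff.rfl)]
              rw [if_pos ((hDRmem r).mpr hr), if_pos hb]
            · have : (DR.map (fun v =>
                  if r = v ∧ (PySem.Set.contains DL (r - 1) && PySem.Set.contains DL (r + 1)) = true
                  then (-1:Int) else 0)) = DR.map (fun _ => (0:Int)) := by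
                refine List.map_congr_left fun v _ => ?_
                rw [if_neg]; rintro ⟨_, hc⟩; exact hb hc
              rw [this, if_neg hb]; simp
    have hsplit : (DL.map (fun l => ((Rs.count (l - 1) : Nat) : Int) + ((Rs.count (l + 1) : Nat) : Int))).sum =
        (DL.map (fun l => ((Rs.count (l - 1) : Nat) : Int))).sum +
        (DL.map (fun l => ((Rs.count (l + 1) : Nat) : Int))).sum := sum_map_add DL _ _
    rw [hsplit, h1, h2, h3, ← sum_map_add, ← sum_map_add]
    refine congrArg _ (List.map_congr_left fun r _ => ?_)
    rw [solInnerA_eq]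
    have c1 : (PySem.Set.contains DL (r - 1) = true) ↔ r - 1 ∈ Ls := by
      rw [PySem.Set.contains_iff]; exact hDLmem _
    have c2 : (PySem.Set.contains DL (r + 1) = true) ↔ r + 1 ∈ Ls := by
      rw [PySem.Set.contains_iff]; exact hDLmem _
    by_cases hm1 : r - 1 ∈ Ls <;> by_cases hm2 : r + 1 ∈ Ls <;>
      simp [hm1, hm2, hDLmem]
  rw [key]
  ring
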